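-- pv_equiv track=rewrite | github.com/hezengwei1-beep/baidu-netdisk-manager | dedup.py | _common_prefix_depth
-- ===== SOURCE A (Python) =====
-- def _common_prefix_depth(files: list[dict]) -> int:
--     """计算文件路径的公共前缀深度"""
--     if not files:
--         return 0
--     parts_list = [f["path"].strip("/").split("/") for f in files]
--     min_len = min(len(p) for p in parts_list)
--     depth = 0
--     for i in range(min_len):
--         if len(set(p[i] for p in parts_list)) == 1:
--             depth += 1
--         else:
--             break
--     return depth
-- ===== SOURCE B (Python) =====
-- def _common_prefix_depth(files: list[dict]) -> int:
--     """Pairwise fold: keep the running common prefix of the split paths."""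
--     if not files:
--         return 0
--     prefix = files[0]["path"].strip("/").split("/")
--     for f in files[1:]:
--         parts = f["path"].strip("/").split("/")
--         keep = []
--         for a, b in zip(prefix, parts):
--             if a != b:
--                 break
--             keep.append(a)
--         prefix = keep
--     return len(prefix)
-- ===== Notes on version B (the rewrite author's own statement) =====
-- stated objective: alternative
-- what changed: Replaces the per-level scan that builds a set of all files' i-th components with a single pairwise fold that intersects a running common prefix with each file's path parts.
import Mathlib
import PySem

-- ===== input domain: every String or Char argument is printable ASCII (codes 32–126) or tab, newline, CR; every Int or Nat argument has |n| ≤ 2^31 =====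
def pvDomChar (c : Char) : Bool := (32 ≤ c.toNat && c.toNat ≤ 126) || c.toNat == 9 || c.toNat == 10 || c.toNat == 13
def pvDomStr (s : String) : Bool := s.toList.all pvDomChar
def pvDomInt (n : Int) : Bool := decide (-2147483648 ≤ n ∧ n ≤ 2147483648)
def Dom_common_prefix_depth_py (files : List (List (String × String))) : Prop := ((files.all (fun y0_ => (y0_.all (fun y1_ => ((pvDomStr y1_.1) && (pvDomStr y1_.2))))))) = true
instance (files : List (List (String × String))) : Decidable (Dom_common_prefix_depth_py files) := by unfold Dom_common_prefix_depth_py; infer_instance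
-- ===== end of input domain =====

-- B replaces A's per-level set-of-all-files scan by a single pairwise fold of a running common prefix (same return value; alternative decomposition).


-- ===== PORT A =====
-- f["path"].strip("/").split("/"); split? is some (the separator "/" is nonempty) and
-- the .getD "" for the key lookup is only reached when "path" is missing, which Pre_
-- excludes (Python raises KeyError there).
def pvPartsA (f : List (String × String)) : List String :=
  (PySem.Str.split? (PySem.Str.stripChars ((PySem.Dict.get? (PySem.Dict.mk f) "path").getD "") "/") "/").getD []

-- the 'for i in range(min_len)' loop with its break
def pvLoopA (parts : List (List String)) (depth : Int) : List Int → Int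
  | [] => depth
  | i :: rest =>
      if (PySem.Set.ofList (parts.map (fun p => PySem.List.pyGet? p i))).length == 1 then
        pvLoopA parts (depth + 1) rest
      else depth

def common_prefix_depth_py (files : List (List (String × String))) : Int :=
  match files with
  | [] => 0
  | _ =>
    let parts_list := files.map pvPartsA
    -- min(len(p) for p in parts_list); parts_list is nonempty here, so min? is some
    let min_len : Int := (PySem.List.min? (parts_list.map (fun p => (p.length : Int))) (fun x => x)).getD 0
    pvLoopA parts_list 0 (PySem.List.pyRange 0 min_len 1)

-- ===== PORT B =====
def pvPartsB (f : List (String × String)) : List String :=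
  (PySem.Str.split? (PySem.Str.stripChars ((PySem.Dict.get? (PySem.Dict.mk f) "path").getD "") "/") "/").getD []

-- the zip/break/append inner loop of Source B: common prefix of two part lists
def pvLcp : List String → List String → List String
  | a :: xs, b :: ys => if a == b then a :: pvLcp xs ys else []
  | _, _ => []

def common_prefix_depth_py_alt (files : List (List (String × String))) : Int :=
  match files with
  | [] => 0
  | f0 :: rest =>
    ((rest.foldl (fun pre f => pvLcp pre (pvPartsB f)) (pvPartsB f0)).length : Int)

-- ===== PRECONDITION & SPEC =====
-- Pre_ excludes exactly the inputs where some file dict has no "path" key: Python A raises KeyError there (and so does B).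
def Pre_common_prefix_depth_py (files : List (List (String × String))) : Prop :=
  ∀ f ∈ files, "path" ∈ f.map Prod.fst
instance (files : List (List (String × String))) : Decidable (Pre_common_prefix_depth_py files) := by unfold Pre_common_prefix_depth_py; infer_instance

def pvWitness_common_prefix_depth_py : (List (List (String × String))) :=
  [[("path", "a/b/c")], [("path", "a/b/d")]]

def Spec_common_prefix_depth_py (files : List (List (String × String))) (out : Int) : Prop := out = common_prefix_depth_py_alt files
instance (files : List (List (String × String))) (out : Int) : Decidable (Spec_common_prefix_depth_py files out) := by unfold Spec_common_prefix_depth_py; infer_instance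

-- ===== CLAIM (what is proved, stated in full; the proofs are below) =====
def Claim_equal_common_prefix_depth_py : Prop := ∀ (files : List (List (String × String))), Dom_common_prefix_depth_py files → Pre_common_prefix_depth_py files → Spec_common_prefix_depth_py files (common_prefix_depth_py files)

-- ===== LEMMAS AND PROOFS =====

theorem pvLcp_prefix_left : ∀ (xs ys : List String), pvLcp xs ys <+: xs
  | [], _ => by simp [pvLcp]
  | _ :: _, [] => by simp [pvLcp]
  | a :: xs, b :: ys => by
      simp only [pvLcp]
      split
      · exact List.cons_prefix_cons.mpr ⟨rfl, pvLcp_prefix_left xs ys⟩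
      · simp

theorem pvLcp_prefix_right : ∀ (xs ys : List String), pvLcp xs ys <+: ys
  | [], _ => by simp [pvLcp]
  | _ :: _, [] => by simp [pvLcp]
  | a :: xs, b :: ys => by
      simp only [pvLcp]
      split
      next h =>
        have hab : a = b := by simpa using h
        subst hab
        exact List.cons_prefix_cons.mpr ⟨rfl, pvLcp_prefix_right xs ys⟩
      · simp

theorem pvLcp_stop : ∀ (xs ys : List String),
    (pvLcp xs ys).length < xs.length → (pvLcp xs ys).length < ys.length →
    xs[(pvLcp xs ys).length]? ≠ ys[(pvLcp xs ys).length]?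
  | [], _ => by simp
  | _ :: _, [] => by simp
  | a :: xs, b :: ys => by
      simp only [pvLcp]
      split
      next h =>
        intro hx hy
        simpa using pvLcp_stop xs ys (by simpa using hx) (by simpa using hy)
      next h =>
        intro _ _
        simpa using fun hab => h (by simpa using hab)

theorem pvFold_prefix : ∀ (ps : List (List String)) (p0 : List String),
    (ps.foldl pvLcp p0 <+: p0) ∧ ∀ p ∈ ps, ps.foldl pvLcp p0 <+: p
  | [], p0 => by simp
  | p :: ps, p0 => by
      simp only [List.foldl_cons, List.mem_cons]
      obtain ⟨h1, h2⟩ := pvFold_prefix ps (pvLcp p0 p)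
      refine ⟨h1.trans (pvLcp_prefix_left _ _), ?_⟩
      rintro q (rfl | hq)
      · exact h1.trans (pvLcp_prefix_right _ _)
      · exact h2 q hq

-- a prefix agrees with the long list at every index below its length
theorem pvPrefix_getElem? {l1 l2 : List String} (h : l1 <+: l2) {i : Nat} (hi : i < l1.length) :
    l2[i]? = l1[i]? := by
  obtain ⟨t, rfl⟩ := h
  exact List.getElem?_append_left hi

-- if the fold stops strictly below every list's length, two of the lists differ there
theorem pvFold_stop : ∀ (ps : List (List String)) (p0 : List String),
    (ps.foldl pvLcp p0).length < p0.length →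
    (∀ p ∈ ps, (ps.foldl pvLcp p0).length < p.length) →
    ∃ p ∈ p0 :: ps, ∃ q ∈ p0 :: ps,
      p[(ps.foldl pvLcp p0).length]? ≠ q[(ps.foldl pvLcp p0).length]?
  | [], p0 => by simp
  | p :: ps, p0 => by
      intro h0 hall
      simp only [List.foldl_cons] at *
      set P := ps.foldl pvLcp (pvLcp p0 p) with hP
      have hPm : P <+: pvLcp p0 p := (pvFold_prefix ps (pvLcp p0 p)).1
      rcases lt_or_eq_of_le hPm.length_le with hlt | heq
      · -- recurse with p0 := pvLcp p0 p
        obtain ⟨x, hx, y, hy, hxy⟩ := pvFold_stop ps (pvLcp p0 p) hlt (fun q hq => hall q (by simp [hq]))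
        have fix : ∀ z, z ∈ pvLcp p0 p :: ps → ∃ z' ∈ p0 :: p :: ps, z'[P.length]? = z[P.length]? := by
          intro z hz
          rcases List.mem_cons.mp hz with hz1 | hz2
          · subst hz1
            exact ⟨p0, by simp, pvPrefix_getElem? (pvLcp_prefix_left p0 p) hlt⟩
          · exact ⟨z, by simp [hz2], rfl⟩
        obtain ⟨x', hx', hxe⟩ := fix x hx
        obtain ⟨y', hy', hye⟩ := fix y hy
        exact ⟨x', hx', y', hy', by rw [hxe, hye]; exact hxy⟩
      · -- P has the full length of pvLcp p0 p, so p0 and p differ at P.length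
        have h1 : P.length < p0.length := h0
        have h2 : P.length < p.length := hall p (by simp)
        rw [heq] at h1 h2 ⊢
        exact ⟨p0, by simp, p, by simp, pvLcp_stop p0 p h1 h2⟩

-- Set.add never shrinks a set
theorem pvFoldlAdd_len_le {α : Type} [BEq α] : ∀ (t : List α) (s : PySem.Set α),
    s.length ≤ (t.foldl PySem.Set.add s).length
  | [], s => le_refl _
  | y :: t, s => by
      simp only [List.foldl_cons]
      refine le_trans ?_ (pvFoldlAdd_len_le t _)
      simp only [PySem.Set.add]
      split <;> simp

-- set(l) for a nonempty list l has one element iff all elements equal the head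
theorem pvSetLen_one_iff {α : Type} [BEq α] [LawfulBEq α] (x : α) : ∀ t : List α,
    ((PySem.Set.ofList (x :: t)).length = 1) ↔ ∀ y ∈ t, y = x := by
  have key : ∀ t : List α, ((t.foldl PySem.Set.add [x]).length = 1) ↔ ∀ y ∈ t, y = x := by
    intro t
    induction t with
    | nil => simp
    | cons y t ih =>
      simp only [List.foldl_cons]
      by_cases hyx : y = x
      · subst hyx
        rw [show PySem.Set.add [y] y = [y] by simp [PySem.Set.add, PySem.Set.contains]]
        simp only [List.mem_cons]
        constructor
        · intro h z hz
          rcases hz with rfl | hz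
          · rfl
          · exact (ih.mp h) z hz
        · intro h
          exact ih.mpr (fun z hz => h z (Or.inr hz))
      · have hadd : PySem.Set.add [x] y = [x, y] := by
          have hc : PySem.Set.contains [x] y = false := by
            simp only [PySem.Set.contains, List.contains_eq_mem, List.mem_singleton,
              decide_eq_false_iff_not]
            exact hyx
          unfold PySem.Set.add
          rw [hc]
          simp
        rw [hadd]
        have h2 := pvFoldlAdd_len_le t [x, y]
        simp only [List.length_cons] at h2
        constructor
        · intro h; omega
        · intro h; exact absurd (h y (by simp)) hyx
  intro t
  rw [show PySem.Set.ofList (x :: t) = t.foldl PySem.Set.add [x] from rfl]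
  exact key t

-- the range loop of A counts exactly n steps when columns < n agree and column n does not
theorem pvLoopA_run (parts : List (List String)) (n : Nat) (M : Int)
    (hnM : (n : Int) ≤ M)
    (hcol : ∀ j : Nat, j < n →
      ((PySem.Set.ofList (parts.map (fun p => PySem.List.pyGet? p (j : Int)))).length == 1) = true)
    (hstop : (n : Int) < M →
      ((PySem.Set.ofList (parts.map (fun p => PySem.List.pyGet? p (n : Int)))).length == 1) = false) :
    ∀ (k : Nat) (i d : Int), 0 ≤ i → i ≤ (n : Int) → (M - i).toNat = k →
      pvLoopA parts d (PySem.List.pyRange i M 1) = d + ((n : Int) - i) := by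
  intro k
  induction k with
  | zero =>
    intro i d hi0 hin hk
    have hMi : M ≤ i := by omega
    have : i = (n : Int) := by omega
    rw [PySem.List.pyRange_one_eq_nil hMi]
    simp [pvLoopA]
    omega
  | succ k ih =>
    intro i d hi0 hin hk
    have hiM : i < M := by omega
    rw [PySem.List.pyRange_one_cons hiM]
    by_cases hilt : i < (n : Int)
    · obtain ⟨j, rfl⟩ : ∃ j : Nat, i = (j : Int) := ⟨i.toNat, by omega⟩
      have hjn : j < n := by exact_mod_cast hilt
      simp only [pvLoopA, hcol j hjn, if_true]
      rw [ih ((j : Int) + 1) (d + 1) (by omega) (by omega) (by omega)]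
      omega
    · have : i = (n : Int) := by omega
      subst this
      have hc := hstop hiM
      simp only [pvLoopA, hc]
      simp

-- the whole nonempty case, over the list of part-lists
theorem pvMain (p0 : List String) (ps : List (List String)) :
    pvLoopA (p0 :: ps) 0 (PySem.List.pyRange 0
        ((ps.map (fun p => (p.length : Int))).foldl min (p0.length : Int)) 1)
      = ((ps.foldl pvLcp p0).length : Int) := by
  set P := ps.foldl pvLcp p0 with hPdef
  set n := P.length with hn
  set M := ((ps.map (fun p => (p.length : Int))).foldl min (p0.length : Int)) with hM
  have hMle := PySem.List.foldl_min_le (ps.map (fun p => (p.length : Int))) (p0.length : Int)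
  have hMmem := PySem.List.foldl_min_mem (ps.map (fun p => (p.length : Int))) (p0.length : Int)
  have hpre := pvFold_prefix ps p0
  have hnlen : ∀ p, p ∈ p0 :: ps → n ≤ p.length := by
    intro p hp
    rcases List.mem_cons.mp hp with h | h
    · rw [h]; exact hpre.1.length_le
    · exact (hpre.2 p h).length_le
  have hnM : (n : Int) ≤ M := by
    rcases hMmem with h | h
    · rw [← hM] at h; rw [h]; exact_mod_cast hnlen p0 (by simp)
    · rw [← hM] at h
      obtain ⟨p, hp, hpl⟩ := List.mem_map.mp h
      rw [← hpl]
      exact_mod_cast hnlen p (by simp [hp])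
  have hMlen : ∀ p, p ∈ p0 :: ps → M ≤ (p.length : Int) := by
    intro p hp
    rcases List.mem_cons.mp hp with h | h
    · rw [h]; exact hMle.1
    · exact hMle.2 _ (List.mem_map.mpr ⟨p, h, rfl⟩)
  -- column agreement below n
  have hcol : ∀ j : Nat, j < n →
      ((PySem.Set.ofList ((p0 :: ps).map (fun p => PySem.List.pyGet? p (j : Int)))).length == 1) = true := by
    intro j hj
    have hval : ∀ p, p ∈ p0 :: ps → PySem.List.pyGet? p (j : Int) = P[j]? := by
      intro p hp
      rw [PySem.List.pyGet?_natCast]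
      refine pvPrefix_getElem? ?_ hj
      rcases List.mem_cons.mp hp with h | h
      · rw [h]; exact hpre.1
      · exact hpre.2 p h
    simp only [List.map_cons]
    rw [hval p0 (by simp)]
    have htail : ∀ y ∈ ps.map (fun p => PySem.List.pyGet? p (j : Int)), y = P[j]? := by
      intro y hy
      obtain ⟨p, hp, rfl⟩ := List.mem_map.mp hy
      exact hval p (by simp [hp])
    simpa using (pvSetLen_one_iff (P[j]?) _).mpr htail
  -- column n disagrees when n < M
  have hstop : (n : Int) < M →
      ((PySem.Set.ofList ((p0 :: ps).map (fun p => PySem.List.pyGet? p (n : Int)))).length == 1) = false := by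
    intro hlt
    have hlen : ∀ p, p ∈ p0 :: ps → n < p.length := by
      intro p hp
      have := hMlen p hp
      omega
    obtain ⟨x, hx, y, hy, hxy⟩ :=
      pvFold_stop ps p0 (hlen p0 (by simp)) (fun p hp => hlen p (by simp [hp]))
    rw [Bool.eq_false_iff]
    intro hone
    have hone' : (PySem.Set.ofList (PySem.List.pyGet? p0 (n : Int) ::
        ps.map (fun p => PySem.List.pyGet? p (n : Int)))).length = 1 := by
      have := hone
      rw [List.map_cons] at this
      simpa using this
    have h1 := (pvSetLen_one_iff (PySem.List.pyGet? p0 (n : Int))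
        (ps.map (fun p => PySem.List.pyGet? p (n : Int)))).mp hone'
    have hall : ∀ z ∈ p0 :: ps, PySem.List.pyGet? z (n : Int) = PySem.List.pyGet? p0 (n : Int) := by
      intro z hz
      rcases List.mem_cons.mp hz with h | h
      · rw [h]
      · exact h1 _ (List.mem_map.mpr ⟨z, h, rfl⟩)
    apply hxy
    have ex := (hall x hx).trans (hall y hy).symm
    rwa [PySem.List.pyGet?_natCast, PySem.List.pyGet?_natCast] at ex
  have hrun := pvLoopA_run (p0 :: ps) n M hnM hcol hstop (M - 0).toNat 0 0 le_rfl
    (by positivity) rfl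
  rw [hrun]
  omega

-- ===== VERDICT (by name: the statement is the Claim_ definition above) =====
theorem common_prefix_depth_py_spec : Claim_equal_common_prefix_depth_py := by
  intro files _ _
  unfold Spec_common_prefix_depth_py
  match files with
  | [] => rfl
  | f :: fs =>
    have hA : common_prefix_depth_py (f :: fs)
        = pvLoopA (pvPartsA f :: fs.map pvPartsA) 0 (PySem.List.pyRange 0
            ((PySem.List.min? ((pvPartsA f :: fs.map pvPartsA).map (fun p => (p.length : Int)))
              (fun x => x)).getD 0) 1) := rfl
    have hBdef : common_prefix_depth_py_alt (f :: fs)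
        = (((fs.map pvPartsA).foldl pvLcp (pvPartsA f)).length : Int) := by
      show ((fs.foldl (fun pre g => pvLcp pre (pvPartsA g)) (pvPartsA f)).length : Int) = _
      rw [List.foldl_map]
    rw [hA, hBdef, List.map_cons, PySem.List.min?_id_cons, Option.getD_some]
    exact pvMain (pvPartsA f) (fs.map pvPartsA)
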